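-- pv_equiv track=rewrite | github.com/Avery-Littlemore/random_exercises | reverse_constants.py | reverse_constants
-- ===== SOURCE A (Python) =====
-- def reverse_constants(str):
--     left = 0
--     right = len(str) - 1
--     vowels = 'AEIOUaeiou'
--     str_array = list(str)
--     while left <= right:
--         if str_array[left] in vowels:
--             left += 1
--             continue
--         elif str_array[right] in vowels:
--             right -= 1
--             continue
--         else:
--             [str_array[left], str_array[right]] = [str_array[right], str_array[left]]
--             left += 1
--             right -= 1
--     return ''.join(str_array)
-- ===== SOURCE B (Python) =====
-- def reverse_constants(str):
--     vowels = 'AEIOUaeiou'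
--     stack = [c for c in str if c not in vowels]
--     out = []
--     for ch in str:
--         if ch in vowels:
--             out.append(ch)
--         else:
--             out.append(stack.pop())
--     return ''.join(out)
-- ===== Notes on version B (the rewrite author's own statement) =====
-- stated objective: alternative
-- what changed: Replaces A's in-place two-pointer swap loop over the char array with a single extract pass that collects the consonants, reverses them, and refills them into the consonant positions on one forward walk.
import Mathlib
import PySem

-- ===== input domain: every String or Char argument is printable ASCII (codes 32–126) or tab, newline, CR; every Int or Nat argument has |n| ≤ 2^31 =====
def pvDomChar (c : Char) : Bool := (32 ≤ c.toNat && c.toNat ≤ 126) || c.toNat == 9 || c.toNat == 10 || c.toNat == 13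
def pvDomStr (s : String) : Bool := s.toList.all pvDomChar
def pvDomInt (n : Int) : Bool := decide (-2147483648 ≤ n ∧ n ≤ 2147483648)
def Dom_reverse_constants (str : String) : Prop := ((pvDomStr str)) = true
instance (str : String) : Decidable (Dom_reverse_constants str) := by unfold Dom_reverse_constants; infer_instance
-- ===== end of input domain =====

-- B replaces A's in-place two-pointer swapping with a one-pass extract-reverse-refill
-- of the consonants (objective: alternative decomposition; same asymptotic cost).

-- ===== PORT A =====
-- vowels = 'AEIOUaeiou'
def pvVowels : List Char := ['A', 'E', 'I', 'O', 'U', 'a', 'e', 'i', 'o', 'u']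

-- 'c in vowels'
def pvIsVowel (c : Char) : Bool := decide (c ∈ pvVowels)

-- the while loop of A over str_array with pointers left and right
def pvLoopA (arr : List Char) (l r : Int) : List Char :=
  if h : l ≤ r then
    match PySem.List.pyGet? arr l, PySem.List.pyGet? arr r with
    | some cl, some cr =>
      if pvIsVowel cl then pvLoopA arr (l + 1) r
      else if pvIsVowel cr then pvLoopA arr l (r - 1)
      else pvLoopA ((arr.set l.toNat cr).set r.toNat cl) (l + 1) (r - 1)
    | _, _ => arr  -- IndexError guard; unreachable from A's initial call (0 ≤ l ≤ r < len)
  else arr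
termination_by (r + 1 - l).toNat
decreasing_by all_goals (simp; omega)

def reverse_constants (str : String) : String :=
  String.mk (pvLoopA str.toList 0 ((str.toList.length : Int) - 1))

-- ===== PORT B =====
-- the for-loop of B: walk the string, keep vowels, else pop the last consonant off the stack
def pvRefillPop : List Char → List Char → List Char
  | [], _ => []
  | c :: rest, st =>
    if pvIsVowel c then c :: pvRefillPop rest st
    else
      match PySem.List.pop? st with
      | some (t, ts) => t :: pvRefillPop rest ts
      | none => c :: pvRefillPop rest []  -- stack.pop() IndexError guard; unreachable (stack holds all consonants)

def reverse_constants_alt (str : String) : String :=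
  String.mk (pvRefillPop str.toList (str.toList.filter (fun c => !pvIsVowel c)))

-- ===== PRECONDITION & SPEC =====
def Spec_reverse_constants (str : String) (out : String) : Prop := out = reverse_constants_alt str
instance (str : String) (out : String) : Decidable (Spec_reverse_constants str out) := by unfold Spec_reverse_constants; infer_instance

-- ===== CLAIM (what is proved, stated in full; the proofs are below) =====
def Claim_equal_reverse_constants : Prop := ∀ (str : String), Dom_reverse_constants str → Spec_reverse_constants str (reverse_constants str)

-- ===== LEMMAS AND PROOFS =====

-- proof-side reformulation of B's loop: consuming the reversed stack from the front
def pvRefill : List Char → List Char → List Char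
  | [], _ => []
  | c :: rest, st =>
    if pvIsVowel c then c :: pvRefill rest st
    else
      match st with
      | t :: ts => t :: pvRefill rest ts
      | [] => c :: pvRefill rest []

-- popping off the end of the stack is consuming its reverse from the front
lemma pv_refillPop_eq_refill : ∀ (xs st : List Char), pvRefillPop xs st = pvRefill xs st.reverse := by
  intro xs
  induction xs with
  | nil => intro st; rfl
  | cons c rest ih =>
    intro st
    by_cases hv : pvIsVowel c
    · simp [pvRefillPop, pvRefill, hv, ih]
    · rcases List.eq_nil_or_concat st with hst | ⟨st0, t, hst⟩
      · subst hst
        simp [pvRefillPop, pvRefill, PySem.List.pop?, hv, ih]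
      · rw [List.concat_eq_append] at hst
        subst hst
        simp [pvRefillPop, pvRefill, PySem.List.pop?_last, hv, ih]

-- setting index pre.length in pre ++ c :: rest replaces c
lemma pv_set_append_cons (pre : List Char) (c x : Char) (rest : List Char) :
    (pre ++ c :: rest).set pre.length x = pre ++ x :: rest := by
  induction pre with
  | nil => simp
  | cons p ps ih => simp [ih]

-- refilling an appended list splits, the tail consuming what the head left
lemma pv_refill_append : ∀ (xs ys st : List Char),
    pvRefill (xs ++ ys) st
      = pvRefill xs st ++ pvRefill ys (st.drop (xs.filter (fun c => !pvIsVowel c)).length) := by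
  intro xs
  induction xs with
  | nil => intro ys st; simp [pvRefill]
  | cons c rest ih =>
    intro ys st
    by_cases hv : pvIsVowel c
    · simp [pvRefill, hv, ih]
    · cases st with
      | nil => simp [pvRefill, hv, ih]
      | cons t ts => simp [pvRefill, hv, ih]

-- extra stack beyond the consonant count is never consulted
lemma pv_refill_extra : ∀ (xs st ex : List Char),
    (xs.filter (fun c => !pvIsVowel c)).length ≤ st.length →
    pvRefill xs (st ++ ex) = pvRefill xs st := by
  intro xs
  induction xs with
  | nil => intro st ex _; simp [pvRefill]
  | cons c rest ih =>
    intro st ex h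
    by_cases hv : pvIsVowel c
    · simp [pvRefill, hv] at h ⊢
      exact ih st ex h
    · cases st with
      | nil => simp [hv] at h
      | cons t ts =>
        simp [pvRefill, hv] at h ⊢
        exact ih ts ex h

-- the loop of A reverses the consonants of the untouched middle segment
lemma pvLoopA_eq (n : Nat) : ∀ (mid pre post : List Char), mid.length ≤ n →
    pvLoopA (pre ++ mid ++ post) (pre.length : Int)
        ((pre.length : Int) + (mid.length : Int) - 1)
      = pre ++ pvRefill mid ((mid.filter (fun c => !pvIsVowel c)).reverse) ++ post := by
  induction n with
  | zero =>
    intro mid pre post h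
    have hm : mid = [] := List.length_eq_zero_iff.mp (Nat.le_zero.mp h)
    subst hm
    rw [pvLoopA.eq_def, dif_neg (by push_cast; omega)]
    simp [pvRefill]
  | succ n ih =>
    intro mid pre post h
    cases mid with
    | nil =>
      rw [pvLoopA.eq_def, dif_neg (by simp)]
      simp [pvRefill]
    | cons c1 rest =>
      rcases List.eq_nil_or_concat rest with hr | ⟨mid0, c2, hr⟩
      · subst hr
        have harr : pre ++ [c1] ++ post = pre ++ c1 :: post := by simp
        have hr1 : ((pre.length : Int) + (((c1 :: ([] : List Char)).length : Nat) : Int) - 1)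
            = (pre.length : Int) := by simp
        rw [harr, hr1, pvLoopA.eq_def, dif_pos le_rfl, PySem.List.pyGet?_append_length]
        dsimp only []
        by_cases hv : pvIsVowel c1
        · rw [if_pos hv]
          rw [pvLoopA.eq_def, dif_neg (by omega)]
          simp [pvRefill, hv]
        · rw [if_neg hv, if_neg hv, Int.toNat_natCast, pv_set_append_cons, pv_set_append_cons]
          rw [pvLoopA.eq_def, dif_neg (by omega)]
          simp [pvRefill, hv]
      · rw [List.concat_eq_append] at hr
        subst hr
        have hlen : mid0.length + 1 ≤ n := by simp at h; omega
        have hrI : ((pre.length : Int) + (((c1 :: (mid0 ++ [c2])).length : Nat) : Int) - 1)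
            = ((pre.length + mid0.length + 1 : Nat) : Int) := by push_cast; simp; ring
        have hgl : PySem.List.pyGet? (pre ++ (c1 :: (mid0 ++ [c2])) ++ post) (pre.length : Int)
            = some c1 := by
          rw [show pre ++ (c1 :: (mid0 ++ [c2])) ++ post = pre ++ c1 :: (mid0 ++ c2 :: post) by simp]
          exact PySem.List.pyGet?_append_length _ _ _
        have hgr : PySem.List.pyGet? (pre ++ (c1 :: (mid0 ++ [c2])) ++ post)
            ((pre.length + mid0.length + 1 : Nat) : Int) = some c2 := by
          rw [show pre ++ (c1 :: (mid0 ++ [c2])) ++ post = (pre ++ c1 :: mid0) ++ c2 :: post by simp,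
              show ((pre.length + mid0.length + 1 : Nat) : Int) = ((pre ++ c1 :: mid0).length : Int)
                by simp; omega]
          exact PySem.List.pyGet?_append_length _ _ _
        rw [hrI, pvLoopA.eq_def, dif_pos (by push_cast; omega), hgl, hgr]
        dsimp only []
        by_cases hv1 : pvIsVowel c1
        · rw [if_pos hv1]
          have := ih (mid0 ++ [c2]) (pre ++ [c1]) post (by simpa using hlen)
          rw [show ((pre.length : Int) + 1) = (((pre ++ [c1]).length : Nat) : Int) by simp,
              show ((pre.length + mid0.length + 1 : Nat) : Int)
                  = (((pre ++ [c1]).length : Nat) : Int) + (((mid0 ++ [c2]).length : Nat) : Int) - 1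
                by push_cast; simp; ring,
              show pre ++ (c1 :: (mid0 ++ [c2])) ++ post = (pre ++ [c1]) ++ (mid0 ++ [c2]) ++ post
                by simp,
              this]
          simp [pvRefill, hv1]
        · rw [if_neg hv1]
          by_cases hv2 : pvIsVowel c2
          · rw [if_pos hv2]
            have := ih (c1 :: mid0) pre (c2 :: post) (by simpa using hlen)
            rw [show ((pre.length + mid0.length + 1 : Nat) : Int) - 1
                  = ((pre.length : Nat) : Int) + (((c1 :: mid0).length : Nat) : Int) - 1
                by push_cast; simp; ring,
                show pre ++ (c1 :: (mid0 ++ [c2])) ++ post = pre ++ (c1 :: mid0) ++ (c2 :: post)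
                  by simp,
                this]
            have hfil : (c1 :: (mid0 ++ [c2])).filter (fun c => !pvIsVowel c)
                = (c1 :: mid0).filter (fun c => !pvIsVowel c) := by
              simp [List.filter_append, hv1, hv2]
            rw [hfil, show (c1 :: (mid0 ++ [c2])) = (c1 :: mid0) ++ [c2] by simp,
                pv_refill_append]
            simp [pvRefill, hv2]
          · rw [if_neg hv2, Int.toNat_natCast, Int.toNat_natCast]
            rw [show pre ++ (c1 :: (mid0 ++ [c2])) ++ post = pre ++ c1 :: (mid0 ++ c2 :: post)
                  by simp,
                pv_set_append_cons,
                show pre ++ c2 :: (mid0 ++ c2 :: post) = (pre ++ c2 :: mid0) ++ c2 :: post by simp,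
                show pre.length + mid0.length + 1 = (pre ++ c2 :: mid0).length by simp; omega,
                pv_set_append_cons]
            have := ih mid0 (pre ++ [c2]) (c1 :: post) (by omega)
            rw [show ((pre.length : Int) + 1) = (((pre ++ [c2]).length : Nat) : Int) by simp,
                show (((pre ++ c2 :: mid0).length : Nat) : Int) - 1
                    = (((pre ++ [c2]).length : Nat) : Int) + ((mid0.length : Nat) : Int) - 1
                  by push_cast; simp; ring,
                show (pre ++ c2 :: mid0) ++ c1 :: post = (pre ++ [c2]) ++ mid0 ++ (c1 :: post) by simp,
                this]
            have hR : ((c1 :: (mid0 ++ [c2])).filter (fun c => !pvIsVowel c)).reverse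
                = c2 :: ((mid0.filter (fun c => !pvIsVowel c)).reverse ++ [c1]) := by
              simp [List.filter_append, hv1, hv2]
            rw [hR]
            have hsplit : pvRefill (c1 :: (mid0 ++ [c2]))
                (c2 :: ((mid0.filter (fun c => !pvIsVowel c)).reverse ++ [c1]))
                = c2 :: (pvRefill mid0 ((mid0.filter (fun c => !pvIsVowel c)).reverse) ++ [c1]) := by
              rw [pvRefill.eq_def]
              dsimp only []
              rw [if_neg hv1, pv_refill_append,
                  show ((mid0.filter (fun c => !pvIsVowel c)).reverse ++ [c1]).drop
                      (mid0.filter (fun c => !pvIsVowel c)).length = [c1] by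
                    rw [← List.length_reverse]; exact List.drop_left,
                  pv_refill_extra mid0 _ [c1] (by simp)]
              simp [pvRefill, hv2]
            rw [hsplit]
            simp

-- ===== VERDICT (by name: the statement is the Claim_ definition above) =====
theorem reverse_constants_spec : Claim_equal_reverse_constants := by
  intro s _
  unfold Spec_reverse_constants reverse_constants reverse_constants_alt
  rw [pv_refillPop_eq_refill]
  have := pvLoopA_eq s.toList.length s.toList [] [] le_rfl
  exact congrArg String.mk (by simpa using this)
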